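-- pv_equiv track=rewrite | github.com/Rounak183/NLP | Twitter Sentiment Analysis System/3a/Twitter_sentiment.py | mpqafeat
-- ===== SOURCE A (Python) =====
-- def mpqafeat(st,dic):
--     posi = 0
--     neg = 0
--     for i in st:
--         if i.lower() in dic:
--             if dic[i.lower()] == "positive":
--                 posi += 1
--             elif dic[i.lower()] == "negative":
--                 neg += 1
--     return posi, neg
-- ===== SOURCE B (Python) =====
-- def mpqafeat(st, dic):
--     # Tabulate lowercased token frequencies once, then aggregate per DISTINCT
--     # word: one lexicon lookup per distinct word instead of one per token.
--     freq = {}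
--     for i in st:
--         w = i.lower()
--         freq[w] = freq.get(w, 0) + 1
--     posi = sum(c for w, c in freq.items() if dic.get(w) == "positive")
--     neg = sum(c for w, c in freq.items() if dic.get(w) == "negative")
--     return posi, neg
-- ===== Notes on version B (the rewrite author's own statement) =====
-- stated objective: alternative
-- what changed: B builds a frequency table of lowercased tokens in one pass and then sums the counts of the distinct words whose lexicon label is positive/negative, doing one lookup per distinct word instead of A's per-token membership test plus two lookups and branching.
import Mathlib
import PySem

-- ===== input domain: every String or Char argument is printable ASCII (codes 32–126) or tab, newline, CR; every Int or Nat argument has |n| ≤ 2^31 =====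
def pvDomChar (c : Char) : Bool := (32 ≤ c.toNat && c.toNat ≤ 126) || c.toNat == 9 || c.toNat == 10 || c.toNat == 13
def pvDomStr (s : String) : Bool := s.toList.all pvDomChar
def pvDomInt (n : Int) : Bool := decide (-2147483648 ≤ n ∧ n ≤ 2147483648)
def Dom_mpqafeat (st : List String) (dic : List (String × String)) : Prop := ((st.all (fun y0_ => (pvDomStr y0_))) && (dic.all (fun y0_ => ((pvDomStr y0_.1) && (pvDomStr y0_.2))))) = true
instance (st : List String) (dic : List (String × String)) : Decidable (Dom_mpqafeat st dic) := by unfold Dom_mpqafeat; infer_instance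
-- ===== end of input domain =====

-- B tabulates lowercased token frequencies once and then sums counts per DISTINCT
-- word whose lexicon label is positive/negative, instead of A's per-token branching (alternative).

-- shared primitive: Python dict lookup on the association list (first match)
def pyLookup (dic : List (String × String)) (k : String) : Option String :=
  match dic with
  | [] => none
  | (a, b) :: rest => if a == k then some b else pyLookup rest k

-- ===== PORT A =====
-- loop body of A: `if i.lower() in dic: if dic[i.lower()] == "positive": posi += 1 elif … == "negative": neg += 1`
def mpqafeatStep (dic : List (String × String)) (acc : Int × Int) (i : String) : Int × Int :=
  match pyLookup dic (PySem.Str.lower i) with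
  | none => acc                      -- `i.lower() in dic` is false
  | some v =>                        -- dic[i.lower()] = v
    if v == "positive" then (acc.1 + 1, acc.2)
    else if v == "negative" then (acc.1, acc.2 + 1)
    else acc

def mpqafeat (st : List String) (dic : List (String × String)) : Int × Int :=
  st.foldl (mpqafeatStep dic) (0, 0)

-- ===== PORT B =====
def mpqafeat_alt (st : List String) (dic : List (String × String)) : Int × Int :=
  -- freq[w] = freq.get(w, 0) + 1 over the lowercased tokens
  let freq : PySem.Dict String Int :=
    st.foldl (fun d i => let w := PySem.Str.lower i; d.insert w (d.getD w 0 + 1)) PySem.Dict.empty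
  -- sum(c for w, c in freq.items() if dic.get(w) == "positive") and the "negative" twin
  let posi := freq.items.foldl (fun s wc => if pyLookup dic wc.1 == some "positive" then s + wc.2 else s) (0 : Int)
  let neg := freq.items.foldl (fun s wc => if pyLookup dic wc.1 == some "negative" then s + wc.2 else s) (0 : Int)
  (posi, neg)

-- ===== PRECONDITION & SPEC =====
def Spec_mpqafeat (st : List String) (dic : List (String × String)) (out : Int × Int) : Prop := out = mpqafeat_alt st dic
instance (st : List String) (dic : List (String × String)) (out : Int × Int) : Decidable (Spec_mpqafeat st dic out) := by unfold Spec_mpqafeat; infer_instance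

-- ===== CLAIM (what is proved, stated in full; the proofs are below) =====
def Claim_equal_mpqafeat : Prop := ∀ (st : List String) (dic : List (String × String)), Dom_mpqafeat st dic → Spec_mpqafeat st dic (mpqafeat st dic)

-- ===== LEMMAS AND PROOFS =====

-- A's loop counts, per token, whether the lowercased token's label is positive/negative.
theorem mpqafeat_loop (dic : List (String × String)) (st : List String) (p n : Int) :
    st.foldl (mpqafeatStep dic) (p, n)
    = (p + ((st.map (fun i => PySem.Str.lower i)).countP (fun w => pyLookup dic w == some "positive") : Int),
       n + ((st.map (fun i => PySem.Str.lower i)).countP (fun w => pyLookup dic w == some "negative") : Int)) := by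
  induction st generalizing p n with
  | nil => simp
  | cons i rest ih =>
    rw [List.foldl_cons]
    cases h : pyLookup dic (PySem.Str.lower i) with
    | none =>
      have hstep : mpqafeatStep dic (p, n) i = (p, n) := by simp [mpqafeatStep, h]
      rw [hstep, ih]
      simp [h]
    | some v =>
      by_cases hp : v = "positive"
      · subst hp
        have hstep : mpqafeatStep dic (p, n) i = (p + 1, n) := by simp [mpqafeatStep, h]
        rw [hstep, ih]
        simp [h, Prod.ext_iff]
        omega
      · by_cases hn : v = "negative"
        · subst hn
          have hstep : mpqafeatStep dic (p, n) i = (p, n + 1) := by simp [mpqafeatStep, h]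
          rw [hstep, ih]
          simp [h, Prod.ext_iff]
          omega
        · have hstep : mpqafeatStep dic (p, n) i = (p, n) := by simp [mpqafeatStep, h, hp, hn]
          rw [hstep, ih]
          simp [h, hp, hn]

-- Summing counts over the distinct elements satisfying P equals counting P over the list.
theorem list_length_eq_sum_count {α : Type} [DecidableEq α] (l : List α) :
    l.length = ∑ a ∈ l.toFinset, l.count a := by
  simp

theorem sum_count_dedup (ws : List String) (P : String → Bool) :
    ((((PySem.Set.ofList ws).filter P).map (fun w => (ws.count w : Int))).sum) = (ws.countP P : Int) := by
  have hnodup : ((PySem.Set.ofList ws).filter P).Nodup :=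
    (PySem.Set.nodup_ofList ws).filter P
  have hfin : ((PySem.Set.ofList ws).filter P).toFinset = ws.toFinset.filter (fun w => P w) := by
    ext a
    simp [PySem.Set.mem_ofList]
  have hnat : (∑ a ∈ ws.toFinset.filter (fun w => P w), ws.count a) = ws.countP P := by
    rw [List.countP_eq_length_filter, list_length_eq_sum_count (ws.filter P),
        List.toFinset_filter]
    refine Finset.sum_congr rfl ?_
    intro a ha
    rw [Finset.mem_filter] at ha
    exact (List.count_filter ha.2).symm
  calc ((((PySem.Set.ofList ws).filter P).map (fun w => (ws.count w : Int))).sum)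
      = ∑ a ∈ ((PySem.Set.ofList ws).filter P).toFinset, (ws.count a : Int) := by
        rw [List.sum_toFinset _ hnodup]
    _ = ∑ a ∈ ws.toFinset.filter (fun w => P w), (ws.count a : Int) := by rw [hfin]
    _ = (ws.countP P : Int) := by rw [← hnat]; push_cast; rfl

-- B's filtered item-sum over the frequency table, reduced to the closed count form.
theorem alt_component (ws : List String) (P : String → Bool) :
    ((PySem.Dict.counter ws).items).foldl
        (fun s wc => if P wc.1 then s + wc.2 else s) (0 : Int)
      = (ws.countP P : Int) := by
  rw [PySem.Dict.items_counter,
      PySem.List.foldl_if_eq_foldl_filter (p := fun wc : String × Int => P wc.1)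
        (f := fun s wc => s + wc.2),
      PySem.List.foldl_add (g := fun wc : String × Int => wc.2),
      List.filter_map, List.map_map]
  simpa [Function.comp] using sum_count_dedup ws P

-- ===== VERDICT (by name: the statement is the Claim_ definition above) =====
theorem mpqafeat_spec : Claim_equal_mpqafeat := by
  intro st dic _
  unfold Spec_mpqafeat mpqafeat mpqafeat_alt
  have hfreq : List.foldl (fun (d : PySem.Dict String Int) (i : String) =>
        let w := PySem.Str.lower i; d.insert w (d.getD w 0 + 1)) PySem.Dict.empty st
      = PySem.Dict.counter (st.map (fun i => PySem.Str.lower i)) := by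
    rw [show (fun (d : PySem.Dict String Int) (i : String) =>
          let w := PySem.Str.lower i; d.insert w (d.getD w 0 + 1))
        = (fun (d : PySem.Dict String Int) (i : String) =>
          d.insert (PySem.Str.lower i) (d.getD (PySem.Str.lower i) 0 + 1)) from rfl,
      ← List.foldl_map (f := fun i => PySem.Str.lower i)
        (g := fun (d : PySem.Dict String Int) w => d.insert w (d.getD w 0 + 1)),
      PySem.Dict.foldl_insert_getD_add_one_eq_counter]
  simp only [hfreq]
  rw [alt_component (st.map (fun i => PySem.Str.lower i))
        (fun w => pyLookup dic w == some "positive"),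
      alt_component (st.map (fun i => PySem.Str.lower i))
        (fun w => pyLookup dic w == some "negative"),
      mpqafeat_loop]
  simp [List.countP_map]
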